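-- pv_equiv track=rewrite | github.com/NicolaAggio/Sudoku-Solver | code/utils.py | getBoxDomain
-- ===== SOURCE A (Python) =====
-- DIMENSION = 9
--
-- def getBoxDomain(row, col, board):
--     domain = [int(x) for x in range(1, DIMENSION + 1)]
--     for i in range((row//3) * 3, (row//3) * 3 + 3):
--         for j in range((col//3) * 3, (col//3) * 3 + 3):
--             val = board[i][j]
--             if val in domain:
--                 domain.remove(val)
--     return domain
-- ===== SOURCE B (Python) =====
-- DIMENSION = 9
--
-- def getBoxDomain(row, col, board):
--     r0 = (row // 3) * 3
--     c0 = (col // 3) * 3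
--
--     def present(v):
--         return any(board[i][j] == v
--                    for i in range(r0, r0 + 3)
--                    for j in range(c0, c0 + 3))
--
--     return [v for v in range(1, DIMENSION + 1) if not present(v)]
-- ===== Notes on version B (the rewrite author's own statement) =====
-- stated objective: alternative
-- what changed: Swaps the loop nesting: instead of A's cell-major pass that removes each box value in place from a [1..9] candidate list, B is candidate-major - for each v in 1..9 it tests whether any of the 9 box cells equals v and keeps v if none does.
import Mathlib
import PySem

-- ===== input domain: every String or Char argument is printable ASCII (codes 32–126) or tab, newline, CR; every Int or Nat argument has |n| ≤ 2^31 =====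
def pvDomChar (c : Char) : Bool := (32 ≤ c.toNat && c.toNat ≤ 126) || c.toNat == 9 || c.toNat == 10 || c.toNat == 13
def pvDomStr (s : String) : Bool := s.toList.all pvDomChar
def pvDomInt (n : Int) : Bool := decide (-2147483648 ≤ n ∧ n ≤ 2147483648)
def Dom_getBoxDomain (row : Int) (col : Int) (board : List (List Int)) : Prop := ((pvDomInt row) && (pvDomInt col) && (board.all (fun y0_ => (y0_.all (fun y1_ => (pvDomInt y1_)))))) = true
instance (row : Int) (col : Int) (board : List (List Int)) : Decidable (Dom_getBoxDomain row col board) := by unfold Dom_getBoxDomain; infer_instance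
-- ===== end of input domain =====

-- B swaps the loop nesting: A walks the 9 box cells removing each value in place from a
-- [1..9] candidate list; B walks the candidates 1..9 keeping each one no box cell equals.

-- ===== PORT A =====
def getBoxDomain (row : Int) (col : Int) (board : List (List Int)) : List Int :=
  let domain : List Int := PySem.List.pyRange 1 (9 + 1) 1
  (PySem.List.pyRange (PySem.Int.floordiv row 3 * 3) (PySem.Int.floordiv row 3 * 3 + 3) 1).foldl
    (fun domain i =>
      (PySem.List.pyRange (PySem.Int.floordiv col 3 * 3) (PySem.Int.floordiv col 3 * 3 + 3) 1).foldl
        (fun domain j =>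
          let val := PySem.List.pyGetD (PySem.List.pyGetD board i []) j 0  -- total under Pre_ (in range)
          if domain.contains val then (PySem.List.remove? domain val).getD domain else domain)
        domain)
    domain

-- ===== PORT B =====
-- present(v): does any of the 9 box cells hold v?
def pvPresent (r0 : Int) (c0 : Int) (board : List (List Int)) (v : Int) : Bool :=
  (PySem.List.pyRange r0 (r0 + 3) 1).any fun i =>
    (PySem.List.pyRange c0 (c0 + 3) 1).any fun j =>
      PySem.List.pyGetD (PySem.List.pyGetD board i []) j 0 == v  -- total under Pre_ (in range)

def getBoxDomain_alt (row : Int) (col : Int) (board : List (List Int)) : List Int :=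
  let r0 := PySem.Int.floordiv row 3 * 3
  let c0 := PySem.Int.floordiv col 3 * 3
  (PySem.List.pyRange 1 (9 + 1) 1).filter fun v => !(pvPresent r0 c0 board v)

-- ===== PRECONDITION & SPEC =====
-- Pre_ excludes exactly the inputs on which the Python A raises IndexError: every box row
-- index must be a valid Python index into board and every box column index a valid index
-- into the selected row.
def Pre_getBoxDomain (row : Int) (col : Int) (board : List (List Int)) : Prop :=
  ∀ i ∈ PySem.List.pyRange (PySem.Int.floordiv row 3 * 3) (PySem.Int.floordiv row 3 * 3 + 3) 1,
    PySem.Raise.InRange board.length i ∧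
    ∀ j ∈ PySem.List.pyRange (PySem.Int.floordiv col 3 * 3) (PySem.Int.floordiv col 3 * 3 + 3) 1,
      PySem.Raise.InRange (PySem.List.pyGetD board i []).length j
instance (row : Int) (col : Int) (board : List (List Int)) : Decidable (Pre_getBoxDomain row col board) := by unfold Pre_getBoxDomain; infer_instance

def pvWitness_getBoxDomain : Int × Int × List (List Int) := (0, 0, [[1, 2, 3], [4, 5, 6], [7, 8, 9]])

def Spec_getBoxDomain (row : Int) (col : Int) (board : List (List Int)) (out : List Int) : Prop := out = getBoxDomain_alt row col board
instance (row : Int) (col : Int) (board : List (List Int)) (out : List Int) : Decidable (Spec_getBoxDomain row col board out) := by unfold Spec_getBoxDomain; infer_instance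

-- ===== CLAIM (what is proved, stated in full; the proofs are below) =====
def Claim_equal_getBoxDomain : Prop := ∀ (row : Int) (col : Int) (board : List (List Int)), Dom_getBoxDomain row col board → Pre_getBoxDomain row col board → Spec_getBoxDomain row col board (getBoxDomain row col board)

-- ===== LEMMAS AND PROOFS =====

-- nested loop = fold over the flattened value list
lemma foldl_foldl_flatMap {α β σ : Type} (f : σ → α → σ) (out : List β) (inner : β → List α)
    (s : σ) :
    out.foldl (fun s i => (inner i).foldl f s) s = (out.flatMap inner).foldl f s := by
  induction out generalizing s with
  | nil => rfl
  | cons x xs ih => simp [List.flatMap_cons, List.foldl_append, ih]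

-- a doubly nested loop consuming g i j = a single fold over the flattened value list
lemma nested_foldl_eq {σ : Type} (f : σ → Int → σ) (g : Int → Int → Int)
    (out js : List Int) (s : σ) :
    out.foldl (fun s i => js.foldl (fun s j => f s (g i j)) s) s
      = (out.flatMap (fun i => js.map (g i))).foldl f s := by
  rw [← foldl_foldl_flatMap]
  simp only [List.foldl_map]

-- A's remove loop on a Nodup list is a filter by non-membership
lemma foldl_remove_eq_filter (vals : List Int) : ∀ (dom : List Int), dom.Nodup →
    vals.foldl (fun d v => if d.contains v then (PySem.List.remove? d v).getD d else d) dom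
      = dom.filter (fun x => !(vals.contains x)) := by
  induction vals with
  | nil => intro dom _; simp
  | cons v vs ih =>
    intro dom hnd
    simp only [List.foldl_cons]
    by_cases hv : v ∈ dom
    · rw [if_pos (by simpa using hv), PySem.List.remove?_eq_some_erase dom v hv, Option.getD_some,
        ih _ (hnd.erase v), hnd.erase_eq_filter]
      rw [List.filter_filter]
      apply List.filter_congr
      intro x _
      by_cases h : x = v
      · simp [h]
      · simp [bne, h]
    · rw [if_neg (by simpa using hv), ih _ hnd]
      apply List.filter_congr
      intro x hx
      have : x ≠ v := fun h => hv (h ▸ hx)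
      simp [this]

-- membership in the flattened cell-value list = B's candidate test
lemma contains_flatMap_eq_present (row col : Int) (board : List (List Int)) (v : Int) :
    ((PySem.List.pyRange (PySem.Int.floordiv row 3 * 3) (PySem.Int.floordiv row 3 * 3 + 3) 1).flatMap
        (fun i => (PySem.List.pyRange (PySem.Int.floordiv col 3 * 3) (PySem.Int.floordiv col 3 * 3 + 3) 1).map
          (fun j => PySem.List.pyGetD (PySem.List.pyGetD board i []) j 0))).contains v
      = pvPresent (PySem.Int.floordiv row 3 * 3) (PySem.Int.floordiv col 3 * 3) board v := by
  unfold pvPresent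
  rw [Bool.eq_iff_iff]
  simp only [List.contains_eq_mem, List.mem_flatMap, List.mem_map, List.any_eq_true,
    decide_eq_true_eq, beq_iff_eq]

-- ===== VERDICT (by name: the statement is the Claim_ definition above) =====
theorem getBoxDomain_spec : Claim_equal_getBoxDomain := by
  intro row col board _ _
  unfold Spec_getBoxDomain
  simp only [getBoxDomain, getBoxDomain_alt]
  rw [nested_foldl_eq (f := fun (d : List Int) (v : Int) =>
        if d.contains v then (PySem.List.remove? d v).getD d else d)
      (g := fun i j => PySem.List.pyGetD (PySem.List.pyGetD board i []) j 0),
    foldl_remove_eq_filter _ _ (PySem.List.nodup_pyRange_one 1 (9 + 1))]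
  refine List.filter_congr ?_
  intro x _
  rw [contains_flatMap_eq_present]
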